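-- pv_equiv track=rewrite | github.com/messi10thegoat/milkyhoop-backend | backend/api_gateway/app/routers/chat.py | detect_message_mood
-- ===== SOURCE A (Python) =====
-- def detect_message_mood(message: str) -> tuple:
--     """Simple mood detection from user message"""
--     message_lower = message.lower()
--
--     # Frustrated/angry indicators
--     if any(
--         word in message_lower
--         for word in [
--             "susah",
--             "ribet",
--             "lama",
--             "mahal",
--             "sulit",
--             "rumit",
--             "lambat",
--             "gak bisa",
--             "tidak bisa",
--             "error",
--             "gagal",
--         ]
--     ):
--         return "frustrated", "negative_keywords_detected"
--
--     # Happy/satisfied indicators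
--     elif any(
--         word in message_lower
--         for word in [
--             "bagus",
--             "oke",
--             "terima kasih",
--             "makasih",
--             "mantap",
--             "keren",
--             "sip",
--             "good",
--             "baik",
--             "senang",
--         ]
--     ):
--         return "satisfied", "positive_keywords_detected"
--
--     # Confused/questioning indicators
--     elif any(
--         word in message_lower
--         for word in [
--             "gimana",
--             "bagaimana",
--             "bingung",
--             "tidak tahu",
--             "gak ngerti",
--             "tidak mengerti",
--             "tidak paham",
--         ]
--     ):
--         return "confused", "question_pattern_detected"
--
--     # Urgent/impatient indicators
--     elif any(
--         word in message_lower
--         for word in [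
--             "cepat",
--             "urgent",
--             "penting",
--             "segera",
--             "buru-buru",
--             "sekarang",
--             "asap",
--         ]
--     ):
--         return "urgent", "urgency_keywords_detected"
--
--     # Default neutral
--     else:
--         return "neutral", "no_specific_mood_indicators"
-- ===== SOURCE B (Python) =====
-- # Flat keyword->priority table; one full pass keeps the minimum matched priority.
-- _KEYWORD_PRIORITY = [
--     ("susah", 0), ("ribet", 0), ("lama", 0), ("mahal", 0), ("sulit", 0),
--     ("rumit", 0), ("lambat", 0), ("gak bisa", 0), ("tidak bisa", 0),
--     ("error", 0), ("gagal", 0),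
--     ("bagus", 1), ("oke", 1), ("terima kasih", 1), ("makasih", 1),
--     ("mantap", 1), ("keren", 1), ("sip", 1), ("good", 1), ("baik", 1),
--     ("senang", 1),
--     ("gimana", 2), ("bagaimana", 2), ("bingung", 2), ("tidak tahu", 2),
--     ("gak ngerti", 2), ("tidak mengerti", 2), ("tidak paham", 2),
--     ("cepat", 3), ("urgent", 3), ("penting", 3), ("segera", 3),
--     ("buru-buru", 3), ("sekarang", 3), ("asap", 3),
-- ]
--
-- _MOODS = [
--     ("frustrated", "negative_keywords_detected"),
--     ("satisfied", "positive_keywords_detected"),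
--     ("confused", "question_pattern_detected"),
--     ("urgent", "urgency_keywords_detected"),
--     ("neutral", "no_specific_mood_indicators"),
-- ]
--
--
-- def detect_message_mood(message: str) -> tuple:
--     """Min-priority mood detection over a flat keyword table."""
--     message_lower = message.lower()
--     best = 4
--     for keyword, priority in _KEYWORD_PRIORITY:
--         if priority < best and keyword in message_lower:
--             best = priority
--     return _MOODS[best]
-- ===== Notes on version B (the rewrite author's own statement) =====
-- stated objective: alternative
-- what changed: Replaces the priority-ordered elif cascade of grouped any()-scans by a single full pass over a flat (keyword, priority) table that maintains the minimum matched priority and indexes a moods array with it.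
import Mathlib
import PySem

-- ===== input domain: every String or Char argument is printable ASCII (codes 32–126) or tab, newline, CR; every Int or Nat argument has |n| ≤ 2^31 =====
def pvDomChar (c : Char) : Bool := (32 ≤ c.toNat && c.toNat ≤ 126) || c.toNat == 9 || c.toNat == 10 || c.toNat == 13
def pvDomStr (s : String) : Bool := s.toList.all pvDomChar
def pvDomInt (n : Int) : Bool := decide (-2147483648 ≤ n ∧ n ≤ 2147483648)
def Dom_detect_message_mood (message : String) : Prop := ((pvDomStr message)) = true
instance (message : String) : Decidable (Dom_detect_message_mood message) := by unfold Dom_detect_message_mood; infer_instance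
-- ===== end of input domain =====

-- B replaces A's priority-ordered elif cascade by one full pass over a flat (keyword, priority)
-- table keeping the minimum matched priority, then indexing a moods array (alternative; same cost).

-- ===== PORT A =====
def detect_message_mood (message : String) : String × String :=
  let message_lower := PySem.Str.lower message
  if (["susah", "ribet", "lama", "mahal", "sulit", "rumit", "lambat",
       "gak bisa", "tidak bisa", "error", "gagal"].any
       (fun word => PySem.Str.isIn word message_lower)) then
    ("frustrated", "negative_keywords_detected")
  else if (["bagus", "oke", "terima kasih", "makasih", "mantap", "keren",
            "sip", "good", "baik", "senang"].any
            (fun word => PySem.Str.isIn word message_lower)) then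
    ("satisfied", "positive_keywords_detected")
  else if (["gimana", "bagaimana", "bingung", "tidak tahu", "gak ngerti",
            "tidak mengerti", "tidak paham"].any
            (fun word => PySem.Str.isIn word message_lower)) then
    ("confused", "question_pattern_detected")
  else if (["cepat", "urgent", "penting", "segera", "buru-buru", "sekarang",
            "asap"].any
            (fun word => PySem.Str.isIn word message_lower)) then
    ("urgent", "urgency_keywords_detected")
  else
    ("neutral", "no_specific_mood_indicators")

-- ===== PORT B =====
def kw_priority : List (String × Nat) :=
  [ ("susah", 0), ("ribet", 0), ("lama", 0), ("mahal", 0), ("sulit", 0),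
    ("rumit", 0), ("lambat", 0), ("gak bisa", 0), ("tidak bisa", 0),
    ("error", 0), ("gagal", 0),
    ("bagus", 1), ("oke", 1), ("terima kasih", 1), ("makasih", 1),
    ("mantap", 1), ("keren", 1), ("sip", 1), ("good", 1), ("baik", 1),
    ("senang", 1),
    ("gimana", 2), ("bagaimana", 2), ("bingung", 2), ("tidak tahu", 2),
    ("gak ngerti", 2), ("tidak mengerti", 2), ("tidak paham", 2),
    ("cepat", 3), ("urgent", 3), ("penting", 3), ("segera", 3),
    ("buru-buru", 3), ("sekarang", 3), ("asap", 3) ]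

def moods_table : List (String × String) :=
  [ ("frustrated", "negative_keywords_detected"),
    ("satisfied", "positive_keywords_detected"),
    ("confused", "question_pattern_detected"),
    ("urgent", "urgency_keywords_detected"),
    ("neutral", "no_specific_mood_indicators") ]

def detect_message_mood_alt (message : String) : String × String :=
  let message_lower := PySem.Str.lower message
  let best := kw_priority.foldl
    (fun best p => if p.2 < best ∧ PySem.Str.isIn p.1 message_lower then p.2 else best) 4
  -- _MOODS[best]: exact, since best ≤ 4 always, so Python's indexing never raises
  moods_table.getD best ("neutral", "no_specific_mood_indicators")

-- ===== PRECONDITION & SPEC =====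
def Spec_detect_message_mood (message : String) (out : String × String) : Prop := out = detect_message_mood_alt message
instance (message : String) (out : String × String) : Decidable (Spec_detect_message_mood message out) := by unfold Spec_detect_message_mood; infer_instance

-- ===== CLAIM (what is proved, stated in full; the proofs are below) =====
def Claim_equal_detect_message_mood : Prop := ∀ (message : String), Dom_detect_message_mood message → Spec_detect_message_mood message (detect_message_mood message)

-- ===== LEMMAS AND PROOFS =====
def pvStep (ml : String) : Nat → String × Nat → Nat :=
  fun best p => if p.2 < best ∧ PySem.Str.isIn p.1 ml then p.2 else best

-- the fold over a constant-priority segment computes a conditional minimum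
theorem pv_foldl_const_pri (ml : String) (p : Nat) (g : List String) (best : Nat) :
    (g.map (fun w => (w, p))).foldl (pvStep ml) best
      = if p < best ∧ g.any (fun w => PySem.Str.isIn w ml) then p else best := by
  induction g generalizing best with
  | nil => simp
  | cons w t ih =>
    rw [List.map_cons, List.foldl_cons, ih]
    simp only [pvStep, List.any_cons, Bool.or_eq_true]
    split_ifs <;> first | rfl | omega | tauto

def pvG0 : List String := ["susah", "ribet", "lama", "mahal", "sulit", "rumit", "lambat",
  "gak bisa", "tidak bisa", "error", "gagal"]
def pvG1 : List String := ["bagus", "oke", "terima kasih", "makasih", "mantap", "keren",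
  "sip", "good", "baik", "senang"]
def pvG2 : List String := ["gimana", "bagaimana", "bingung", "tidak tahu", "gak ngerti",
  "tidak mengerti", "tidak paham"]
def pvG3 : List String := ["cepat", "urgent", "penting", "segera", "buru-buru", "sekarang", "asap"]

theorem pv_table_split : kw_priority
    = pvG0.map (fun w => (w, 0)) ++ (pvG1.map (fun w => (w, 1))
      ++ (pvG2.map (fun w => (w, 2)) ++ pvG3.map (fun w => (w, 3)))) := rfl

theorem pv_fold_eq_pvStep (ml : String) (l : List (String × Nat)) (init : Nat) :
    l.foldl (fun best p => if p.2 < best ∧ PySem.Str.isIn p.1 ml then p.2 else best) init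
      = l.foldl (pvStep ml) init := rfl

-- ===== VERDICT (by name: the statement is the Claim_ definition above) =====
theorem detect_message_mood_spec : Claim_equal_detect_message_mood := by
  intro message _
  simp only [Spec_detect_message_mood, detect_message_mood, detect_message_mood_alt]
  set ml := PySem.Str.lower message with hml
  rw [pv_fold_eq_pvStep, pv_table_split, List.foldl_append, List.foldl_append,
      List.foldl_append, pv_foldl_const_pri, pv_foldl_const_pri, pv_foldl_const_pri,
      pv_foldl_const_pri]
  rw [show (["susah", "ribet", "lama", "mahal", "sulit", "rumit", "lambat",
       "gak bisa", "tidak bisa", "error", "gagal"] : List String) = pvG0 from rfl,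
      show (["bagus", "oke", "terima kasih", "makasih", "mantap", "keren",
       "sip", "good", "baik", "senang"] : List String) = pvG1 from rfl,
      show (["gimana", "bagaimana", "bingung", "tidak tahu", "gak ngerti",
       "tidak mengerti", "tidak paham"] : List String) = pvG2 from rfl,
      show (["cepat", "urgent", "penting", "segera", "buru-buru", "sekarang",
       "asap"] : List String) = pvG3 from rfl]
  generalize pvG0.any (fun w => PySem.Str.isIn w ml) = b0
  generalize pvG1.any (fun w => PySem.Str.isIn w ml) = b1
  generalize pvG2.any (fun w => PySem.Str.isIn w ml) = b2
  generalize pvG3.any (fun w => PySem.Str.isIn w ml) = b3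
  cases b0 <;> cases b1 <;> cases b2 <;> cases b3 <;> rfl
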